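-- pv_equiv track=rewrite | github.com/hyeonjjjin/CodeitPython | Greedy.py | min_fee
-- ===== SOURCE A (Python) =====
-- def min_fee(pages_to_print):
--     if len(pages_to_print) == 1:
--         return pages_to_print[0]
--     return sorted(pages_to_print)[0] * len(pages_to_print) + min_fee(sorted(pages_to_print)[1:])
--     '''
--     sorted_list = sorted(pages_to_print)
--     # 총 벌금을 담을 변수
--     total_fee = 0
--
--     # 정렬된 리스트에서 총 벌금 계산
--     for i in range(len(sorted_list)):
--         total_fee += sorted_list[i] * (len(sorted_list) - i)
--
--     return total_fee
--     '''
-- ===== SOURCE B (Python) =====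
-- def min_fee(pages_to_print):
--     total = 0
--     weight = len(pages_to_print)
--     for p in sorted(pages_to_print):
--         total += p * weight
--         weight -= 1
--     return total
-- ===== Notes on version B (the rewrite author's own statement) =====
-- stated objective: faster
-- what changed: replaces the recursion that re-sorts the remaining list at every step with a single sort followed by one pass that sums each sorted element times its decreasing remaining-count weight
import Mathlib
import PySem

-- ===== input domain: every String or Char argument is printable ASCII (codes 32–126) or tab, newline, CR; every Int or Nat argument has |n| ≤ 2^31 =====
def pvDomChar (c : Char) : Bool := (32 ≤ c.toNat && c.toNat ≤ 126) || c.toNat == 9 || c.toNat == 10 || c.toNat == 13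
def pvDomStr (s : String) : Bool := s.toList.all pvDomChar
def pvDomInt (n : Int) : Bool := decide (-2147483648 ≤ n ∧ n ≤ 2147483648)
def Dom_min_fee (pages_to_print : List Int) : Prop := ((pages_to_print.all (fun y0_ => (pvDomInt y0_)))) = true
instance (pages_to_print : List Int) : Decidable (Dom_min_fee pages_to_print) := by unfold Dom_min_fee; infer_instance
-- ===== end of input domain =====

-- B replaces A's recursion (which re-sorts the remaining list at every step) with one sort
-- and a single weighted pass; objective: faster.

-- ===== PORT A =====
def min_fee (pages_to_print : List Int) : Int :=
  if pages_to_print.length = 1 then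
    (PySem.List.pyGet? pages_to_print 0).getD 0
  else
    match h : PySem.List.sorted pages_to_print (fun x => x) false with
    | [] => 0   -- Python raises IndexError here (empty input; excluded by Pre_)
    | m :: rest => m * pages_to_print.length + min_fee rest
termination_by pages_to_print.length
decreasing_by
  have hl := PySem.List.length_sorted (xs := pages_to_print) (key := fun x => x) (rev := false)
  rw [h] at hl
  simp at hl
  omega

-- ===== PORT B =====
def min_fee_alt (pages_to_print : List Int) : Int :=
  ((PySem.List.sorted pages_to_print (fun x => x) false).foldl
    (fun (st : Int × Int) p => (st.1 + p * st.2, st.2 - 1))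
    ((0 : Int), (pages_to_print.length : Int))).1

-- ===== PRECONDITION & SPEC =====
-- Pre_ excludes only the empty list, on which the Python A raises IndexError.
def Pre_min_fee (pages_to_print : List Int) : Prop := pages_to_print ≠ []
instance (pages_to_print : List Int) : Decidable (Pre_min_fee pages_to_print) := by unfold Pre_min_fee; infer_instance
def pvWitness_min_fee : List Int := [3, 1, 2]

def Spec_min_fee (pages_to_print : List Int) (out : Int) : Prop := out = min_fee_alt pages_to_print
instance (pages_to_print : List Int) (out : Int) : Decidable (Spec_min_fee pages_to_print out) := by unfold Spec_min_fee; infer_instance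

-- ===== CLAIM =====
def Claim_equal_min_fee : Prop := ∀ (pages_to_print : List Int), Dom_min_fee pages_to_print → Pre_min_fee pages_to_print → Spec_min_fee pages_to_print (min_fee pages_to_print)

-- ===== LEMMAS AND PROOFS =====

/-- The weighted sum B computes: head * w + next * (w-1) + … -/
def pvWsum : List Int → Int → Int
  | [], _ => 0
  | h :: t, w => h * w + pvWsum t (w - 1)

theorem pvFoldl_wsum (s : List Int) : ∀ (acc w : Int),
    (s.foldl (fun (st : Int × Int) p => (st.1 + p * st.2, st.2 - 1)) (acc, w)).1
      = acc + pvWsum s w := by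
  induction s with
  | nil => intro acc w; simp [pvWsum]
  | cons h t ih => intro acc w; simp [pvWsum, List.foldl, ih]; ring

theorem pvMinFee_eq_wsum (n : Nat) : ∀ (xs : List Int), xs.length = n → xs ≠ [] →
    min_fee xs = pvWsum (PySem.List.sorted xs (fun x => x) false) (xs.length : Int) := by
  induction n using Nat.strong_induction_on with
  | _ n ih =>
    intro xs hn hne
    rw [min_fee]
    by_cases h1 : xs.length = 1
    · match xs, h1 with
      | [a], _ =>
        have hs : PySem.List.sorted [a] (fun x => x) false = [a] :=
          PySem.List.sorted_eq_self_of_pairwise [a] (fun x => x) (by simp)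
        simp [hs, pvWsum, PySem.List.pyGet?, PySem.List.pyIdx?]
    · simp only [h1, if_false]
      have hnil : PySem.List.sorted xs (fun x => x) false ≠ [] := by
        rw [Ne, PySem.List.sorted_eq_nil_iff]; exact hne
      match hsp : PySem.List.sorted xs (fun x => x) false with
      | [] => exact absurd hsp hnil
      | m :: rest =>
        have hl := PySem.List.length_sorted (xs := xs) (key := fun x => x) (rev := false)
        rw [hsp] at hl
        simp at hl
        -- rest is sorted already
        have hpw : (m :: rest).Pairwise (fun a b : Int => a ≤ b) := by
          have := PySem.List.sorted_pairwise xs (fun x => x)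
          rw [hsp] at this; simpa using this
        have hrest_pw : rest.Pairwise (fun a b : Int => a ≤ b) := (List.pairwise_cons.mp hpw).2
        have hrs : PySem.List.sorted rest (fun x => x) false = rest :=
          PySem.List.sorted_eq_self_of_pairwise rest (fun x => x) hrest_pw
        have hrne : rest ≠ [] := by
          intro hc; rw [hc] at hl; simp at hl; omega
        have hrec := ih rest.length (by omega) rest rfl hrne
        rw [hrs] at hrec
        show m * (xs.length : Int) + min_fee rest = pvWsum (m :: rest) (xs.length : Int)
        rw [hrec, pvWsum]
        have hlen : (rest.length : Int) = (xs.length : Int) - 1 := by push_cast; omega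
        rw [hlen]

-- ===== VERDICT =====
theorem min_fee_spec : Claim_equal_min_fee := by
  intro xs _ hpre
  unfold Spec_min_fee min_fee_alt
  rw [pvFoldl_wsum, pvMinFee_eq_wsum xs.length xs rfl hpre]
  ring
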